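-- pv_equiv track=rewrite | github.com/juanschroeder/ahbl-to-axi4 | tb/test_ahb_to_axi4_burst_v54.py | _expected_burst_qwords
-- ===== SOURCE A (Python) =====
-- def _lane_shift(addr):
--     return (addr & 0x7) * 8
--
-- def _mask_nbytes(size_bytes):
--     return (1 << (8 * size_bytes)) - 1
--
-- def _apply_subword_to_qword(old_qword, addr, size_bytes, value):
--     shift = _lane_shift(addr)
--     field_mask = _mask_nbytes(size_bytes) << shift
--     new_bits = (value & _mask_nbytes(size_bytes)) << shift
--     return (old_qword & ~field_mask) | new_bits
--
-- def _qword_addr(addr):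
--     return addr & ~0x7
--
-- def _expected_burst_qwords(initial_qwords, start_addr, beats, size_bytes):
--     expected = dict(initial_qwords)
--
--     for i, value in enumerate(beats):
--         addr = start_addr + i * size_bytes
--         qaddr = _qword_addr(addr)
--         old_qword = expected.get(qaddr, 0)
--         expected[qaddr] = _apply_subword_to_qword(old_qword, addr, size_bytes, value)
--
--     return expected
-- ===== SOURCE B (Python) =====
-- def _expected_burst_qwords(initial_qwords, start_addr, beats, size_bytes):
--     # Group the beats by their target qword first, then assemble each qword once.
--     groups = {}
--     for i, value in enumerate(beats):
--         addr = start_addr + i * size_bytes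
--         groups.setdefault(addr & ~0x7, []).append((addr, value))
--
--     result = dict(initial_qwords)
--     for qaddr, writes in groups.items():
--         qword = result.get(qaddr, 0)
--         for addr, value in writes:
--             lane = (addr & 0x7) * 8
--             bmask = (1 << (8 * size_bytes)) - 1
--             qword = (qword & ~(bmask << lane)) | ((value & bmask) << lane)
--         result[qaddr] = qword
--     return result
-- ===== Notes on version B (the rewrite author's own statement) =====
-- stated objective: alternative
-- what changed: B first groups the burst beats by their target qword address (a dict of per-qword write lists built in one pass) and then assembles each written qword once in a second pass, instead of A's per-beat read-modify-write merge directly into the result dict.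
import Mathlib
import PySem

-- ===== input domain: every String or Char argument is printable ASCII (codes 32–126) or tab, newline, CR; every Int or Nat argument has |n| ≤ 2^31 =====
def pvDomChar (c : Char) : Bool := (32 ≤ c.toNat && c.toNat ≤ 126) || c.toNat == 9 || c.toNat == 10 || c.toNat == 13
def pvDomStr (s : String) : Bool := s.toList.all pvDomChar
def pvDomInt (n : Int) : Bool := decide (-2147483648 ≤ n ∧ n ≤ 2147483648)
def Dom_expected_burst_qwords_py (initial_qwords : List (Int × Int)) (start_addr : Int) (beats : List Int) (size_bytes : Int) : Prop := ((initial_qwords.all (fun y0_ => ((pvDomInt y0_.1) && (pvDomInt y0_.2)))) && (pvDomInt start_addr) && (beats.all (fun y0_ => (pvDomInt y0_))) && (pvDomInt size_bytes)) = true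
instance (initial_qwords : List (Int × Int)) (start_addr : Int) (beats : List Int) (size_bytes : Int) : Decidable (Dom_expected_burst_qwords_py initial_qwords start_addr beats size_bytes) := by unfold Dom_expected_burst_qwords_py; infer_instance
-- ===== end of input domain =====

-- B groups the burst beats by target qword first and then assembles each qword once
-- (group-then-assemble, two phases) instead of A's per-beat merge into the result dict;
-- same cost class, different data-structure/traversal (objective: alternative).

-- ===== PORT A =====
def pvLaneShift (addr : Int) : Int := (PySem.Int.band addr 0x7) * 8

def pvMaskNbytes (size_bytes : Int) : Int := (1 <<< (8 * size_bytes).toNat) - 1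

def pvApplySubwordToQword (old_qword addr size_bytes value : Int) : Int :=
  let shift := pvLaneShift addr
  let field_mask := pvMaskNbytes size_bytes <<< shift.toNat
  let new_bits := (PySem.Int.band value (pvMaskNbytes size_bytes)) <<< shift.toNat
  PySem.Int.bor (PySem.Int.band old_qword (Int.not field_mask)) new_bits

def pvQwordAddr (addr : Int) : Int := PySem.Int.band addr (Int.not 0x7)

def expected_burst_qwords_py (initial_qwords : List (Int × Int)) (start_addr : Int) (beats : List Int) (size_bytes : Int) : List (Int × Int) :=
  let expected := PySem.Dict.ofList initial_qwords
  ((PySem.List.enumerate beats).foldl (fun d iv =>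
      let addr := start_addr + iv.1 * size_bytes
      let qaddr := pvQwordAddr addr
      let old_qword := d.getD qaddr 0
      d.insert qaddr (pvApplySubwordToQword old_qword addr size_bytes iv.2)) expected).items

-- ===== PORT B =====
def expected_burst_qwords_py_alt (initial_qwords : List (Int × Int)) (start_addr : Int) (beats : List Int) (size_bytes : Int) : List (Int × Int) :=
  -- groups.setdefault(k, []).append(w)  ==  groups[k] = groups.get(k, []) + [w]  (exact)
  let groups := (PySem.List.enumerate beats).foldl (fun g iv =>
      let addr := start_addr + iv.1 * size_bytes
      g.insert (PySem.Int.band addr (Int.not 0x7)) (g.getD (PySem.Int.band addr (Int.not 0x7)) [] ++ [(addr, iv.2)])) PySem.Dict.empty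
  let result := PySem.Dict.ofList initial_qwords
  (groups.items.foldl (fun d q =>
      let qword := q.2.foldl (fun qw w =>
        let lane := (PySem.Int.band w.1 0x7) * 8
        let bmask : Int := (1 <<< (8 * size_bytes).toNat) - 1
        PySem.Int.bor (PySem.Int.band qw (Int.not (bmask <<< lane.toNat))) ((PySem.Int.band w.2 bmask) <<< lane.toNat)) (d.getD q.1 0)
      d.insert q.1 qword) result).items

-- ===== PRECONDITION & SPEC =====
-- Pre_ excludes exactly the inputs where the Python A raises (ValueError: negative shift
-- count from 1 << (8*size_bytes) when size_bytes < 0 and some beat is processed).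
def Pre_expected_burst_qwords_py (_initial_qwords : List (Int × Int)) (_start_addr : Int) (beats : List Int) (size_bytes : Int) : Prop := 0 ≤ size_bytes ∨ beats = []
instance (initial_qwords : List (Int × Int)) (start_addr : Int) (beats : List Int) (size_bytes : Int) : Decidable (Pre_expected_burst_qwords_py initial_qwords start_addr beats size_bytes) := by unfold Pre_expected_burst_qwords_py; infer_instance
def pvWitness_expected_burst_qwords_py : (List (Int × Int)) × Int × List Int × Int := ([(0, 5), (8, -1)], 6, [300, -2, 7], 2)

def Spec_expected_burst_qwords_py (initial_qwords : List (Int × Int)) (start_addr : Int) (beats : List Int) (size_bytes : Int) (out : List (Int × Int)) : Prop := out = expected_burst_qwords_py_alt initial_qwords start_addr beats size_bytes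
instance (initial_qwords : List (Int × Int)) (start_addr : Int) (beats : List Int) (size_bytes : Int) (out : List (Int × Int)) : Decidable (Spec_expected_burst_qwords_py initial_qwords start_addr beats size_bytes out) := by unfold Spec_expected_burst_qwords_py; infer_instance

-- ===== CLAIM (what is proved, stated in full; the proofs are below) =====
def Claim_equal_expected_burst_qwords_py : Prop := ∀ (initial_qwords : List (Int × Int)) (start_addr : Int) (beats : List Int) (size_bytes : Int), Dom_expected_burst_qwords_py initial_qwords start_addr beats size_bytes → Pre_expected_burst_qwords_py initial_qwords start_addr beats size_bytes → Spec_expected_burst_qwords_py initial_qwords start_addr beats size_bytes (expected_burst_qwords_py initial_qwords start_addr beats size_bytes)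

-- ===== LEMMAS AND PROOFS =====
-- last-write-wins fold of the payloads of L targeting key a, applied to v
def pvApp (f : Int × Int → Int → Int) (L : List (Int × (Int × Int))) (a v : Int) : Int :=
  ((L.filter (fun p => p.1 == a)).map (·.2)).foldl (fun v b => f b v) v

lemma pvApp_cons (f : Int × Int → Int → Int) (p : Int × (Int × Int)) (L : List (Int × (Int × Int))) (a v : Int) :
    pvApp f (p :: L) a v = if (p.1 == a) = true then pvApp f L a (f p.2 v) else pvApp f L a v := by
  by_cases h : (p.1 == a) = true <;> simp [pvApp, h]

lemma pvApp_not_mem (f : Int × Int → Int → Int) (L : List (Int × (Int × Int))) (a v : Int)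
    (h : a ∉ L.map (·.1)) : pvApp f L a v = v := by
  have hf : L.filter (fun p => p.1 == a) = [] := by
    refine List.filter_eq_nil_iff.mpr fun p hp => ?_
    have : p.1 ≠ a := fun e => h (e ▸ List.mem_map_of_mem hp)
    simp [this]
  simp [pvApp, hf]

-- characterization of A's interleaved per-beat fold
lemma pvA_char (f : Int × Int → Int → Int) (L : List (Int × (Int × Int))) :
    ∀ (d : PySem.Dict Int Int), d.keys.Nodup →
    (L.foldl (fun d p => d.insert p.1 (f p.2 (d.getD p.1 0))) d).items =
    d.items.map (fun q => (q.1, pvApp f L q.1 q.2)) ++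
      ((PySem.Set.ofList (L.map (·.1))).filter (fun a => !d.contains a)).map
        (fun a => (a, pvApp f L a 0)) := by
  induction L with
  | nil => intro d _; simp [pvApp]
  | cons p L ih =>
    intro d hd
    rw [List.foldl_cons, ih _ (PySem.Dict.nodup_keys_insert d p.1 _ hd)]
    rw [List.map_cons, PySem.Set.ofList_cons]
    by_cases hc : d.contains p.1 = true
    · rw [PySem.Dict.items_insert_of_contains d _ hc]
      have hmap : (d.items.map (fun q => if (q.1 == p.1) = true then (p.1, f p.2 (d.getD p.1 0)) else q)).map
            (fun q => (q.1, pvApp f L q.1 q.2)) =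
          d.items.map (fun q => (q.1, pvApp f (p :: L) q.1 q.2)) := by
        rw [List.map_map]
        refine List.map_congr_left fun q hq => ?_
        by_cases he : (q.1 == p.1) = true
        · have he' : q.1 = p.1 := by simpa using he
          have hv : d.getD p.1 0 = q.2 := by
            refine PySem.Dict.getD_of_mem_items d ?_ hd 0
            rw [← he']; exact hq
          simp only [Function.comp_apply, if_pos he, hv, pvApp_cons, he']
          simp
        · have he2 : ¬((p.1 == q.1) = true) := by
            intro h'
            refine he ?_
            rw [beq_iff_eq] at h' ⊢
            exact h'.symm
          simp only [Function.comp_apply, if_neg he, pvApp_cons]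
          rw [if_neg he2]
      rw [hmap]
      congr 1
      -- tail: filters agree and mapped values agree
      have hfil : ((PySem.Set.ofList (L.map (·.1))).filter
            (fun a => !(d.insert p.1 (f p.2 (d.getD p.1 0))).contains a)) =
          ((p.1 :: (PySem.Set.ofList (L.map (·.1))).discard p.1).filter (fun a => !d.contains a)) := by
        rw [List.filter_cons]
        simp only [hc, Bool.not_true]
        show _ = List.filter _ (List.filter _ _)
        rw [List.filter_filter]
        refine List.filter_congr fun a _ => ?_
        rw [PySem.Dict.contains_insert]
        by_cases h1 : (a == p.1) = true <;> by_cases h2 : d.contains a = true <;> simp [h1, h2]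
      rw [hfil]
      refine List.map_congr_left fun a ha => ?_
      have hne : (p.1 == a) = false := by
        rcases List.mem_filter.mp ha with ⟨_, ha2⟩
        have hanp : a ≠ p.1 := by
          intro e
          rw [e, hc] at ha2
          simp at ha2
        exact beq_eq_false_iff_ne.mpr fun e => hanp e.symm
      rw [pvApp_cons, if_neg (fun h => by rw [h] at hne; exact Bool.noConfusion hne)]
    · have hcf : d.contains p.1 = false := by simpa using hc
      rw [PySem.Dict.getD_of_not_contains d 0 hcf,
        PySem.Dict.items_insert_of_not_contains d _ hcf, List.map_append]
      have hmap : d.items.map (fun q => (q.1, pvApp f L q.1 q.2)) =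
          d.items.map (fun q => (q.1, pvApp f (p :: L) q.1 q.2)) := by
        refine List.map_congr_left fun q hq => ?_
        have hqc : d.contains q.1 = true :=
          (PySem.Dict.contains_iff_mem_keys d q.1).mpr (PySem.Dict.mem_keys_of_mem_items d hq)
        have hne : (p.1 == q.1) = false := by
          by_contra h'
          have : p.1 = q.1 := by simpa using (Bool.not_eq_false _).mp h'
          rw [this] at hcf; rw [hqc] at hcf; exact Bool.true_eq_false.mp hcf
        rw [pvApp_cons, if_neg (by simp [hne])]
      rw [hmap]
      have hfil : ((PySem.Set.ofList (L.map (·.1))).filter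
            (fun a => !(d.insert p.1 (f p.2 0)).contains a)) =
          ((PySem.Set.ofList (L.map (·.1))).discard p.1).filter (fun a => !d.contains a) := by
        show _ = List.filter _ (List.filter _ _)
        rw [List.filter_filter]
        refine List.filter_congr fun a _ => ?_
        rw [PySem.Dict.contains_insert]
        by_cases h1 : (a == p.1) = true <;> by_cases h2 : d.contains a = true <;> simp [h1, h2]
      rw [hfil, List.filter_cons]
      have h2 : (!d.contains p.1) = true := by simp [hcf]
      rw [if_pos h2]
      simp only [List.map_cons, List.map_nil, List.append_assoc, List.singleton_append]
      congr 1
      congr 1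
      · show (p.1, pvApp f L p.1 (f p.2 0)) = (p.1, pvApp f (p :: L) p.1 0)
        rw [pvApp_cons, if_pos (by simp)]
      · refine List.map_congr_left fun a ha => ?_
        have hne : (a == p.1) = false := by
          have h3 := (List.mem_filter.mp ha).1
          simp [PySem.Set.discard, List.mem_filter] at h3
          simpa using h3.2
        rw [pvApp_cons, if_neg (by
          simp only [beq_eq_false_iff_ne] at hne
          simp only [beq_iff_eq]
          exact fun h => hne h.symm)]

-- characterization of B's second phase: one insert per distinct key
lemma pvB_char (H : Int → Int → Int) (as : List Int) :
    ∀ (d : PySem.Dict Int Int), as.Nodup → d.keys.Nodup →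
    (as.foldl (fun d a => d.insert a (H a (d.getD a 0))) d).items =
    d.items.map (fun q => (q.1, if q.1 ∈ as then H q.1 q.2 else q.2)) ++
      (as.filter (fun a => !d.contains a)).map (fun a => (a, H a 0)) := by
  induction as with
  | nil => intro d _ _; simp
  | cons a as ih =>
    intro d hnd hd
    have hna : a ∉ as := (List.nodup_cons.mp hnd).1
    rw [List.foldl_cons, ih _ (List.nodup_cons.mp hnd).2 (PySem.Dict.nodup_keys_insert d a _ hd)]
    by_cases hc : d.contains a = true
    · rw [PySem.Dict.items_insert_of_contains d _ hc]
      have hmap : ((d.items.map (fun q => if (q.1 == a) = true then (a, H a (d.getD a 0)) else q)).map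
            (fun q => (q.1, if q.1 ∈ as then H q.1 q.2 else q.2))) =
          d.items.map (fun q => (q.1, if q.1 ∈ a :: as then H q.1 q.2 else q.2)) := by
        rw [List.map_map]
        refine List.map_congr_left fun q hq => ?_
        by_cases he : (q.1 == a) = true
        · have he' : q.1 = a := by simpa using he
          have hv : d.getD a 0 = q.2 := by
            refine PySem.Dict.getD_of_mem_items d ?_ hd 0
            rw [← he']; exact hq
          simp [Function.comp, hv, he', hna]
        · have he' : q.1 ≠ a := by simpa using he
          simp [Function.comp, he, he']
      rw [hmap]
      congr 1
      have hfil : as.filter (fun b => !(d.insert a (H a (d.getD a 0))).contains b) =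
          as.filter (fun b => !d.contains b) := by
        refine List.filter_congr fun b hb => ?_
        rw [PySem.Dict.contains_insert]
        have : (b == a) = false := by
          simp only [beq_eq_false_iff_ne, ne_eq]
          exact fun h => hna (h ▸ hb)
        simp [this]
      rw [hfil, List.filter_cons]
      simp [hc]
    · have hcf : d.contains a = false := by simpa using hc
      rw [PySem.Dict.getD_of_not_contains d 0 hcf,
        PySem.Dict.items_insert_of_not_contains d _ hcf, List.map_append]
      have hmap : d.items.map (fun q => (q.1, if q.1 ∈ as then H q.1 q.2 else q.2)) =
          d.items.map (fun q => (q.1, if q.1 ∈ a :: as then H q.1 q.2 else q.2)) := by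
        refine List.map_congr_left fun q hq => ?_
        have hqc : d.contains q.1 = true :=
          (PySem.Dict.contains_iff_mem_keys d q.1).mpr (PySem.Dict.mem_keys_of_mem_items d hq)
        have hne : q.1 ≠ a := fun h => by rw [h, hcf] at hqc; exact Bool.false_ne_true hqc
        simp [hne]
      rw [hmap]
      have hfil : as.filter (fun b => !(d.insert a (H a 0)).contains b) =
          as.filter (fun b => !d.contains b) := by
        refine List.filter_congr fun b hb => ?_
        rw [PySem.Dict.contains_insert]
        have : (b == a) = false := by
          simp only [beq_eq_false_iff_ne, ne_eq]
          exact fun h => hna (h ▸ hb)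
        simp [this]
      rw [hfil, List.filter_cons]
      have h2 : (if (!d.contains a) = true then a :: List.filter (fun b => !d.contains b) as
          else List.filter (fun b => !d.contains b) as) = a :: List.filter (fun b => !d.contains b) as := by
        simp [hcf]
      rw [h2, List.map_cons, List.append_assoc]
      congr 1
      simp [hna]

-- ===== VERDICT (by name: the statement is the Claim_ definition above) =====
theorem expected_burst_qwords_py_spec : Claim_equal_expected_burst_qwords_py := by
  intro initial_qwords start_addr beats size_bytes _ _
  unfold Spec_expected_burst_qwords_py
  set f : Int × Int → Int → Int :=
    fun w old => pvApplySubwordToQword old w.1 size_bytes w.2 with hf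
  set L : List (Int × (Int × Int)) :=
    (PySem.List.enumerate beats).map
      (fun iv => (pvQwordAddr (start_addr + iv.1 * size_bytes),
        (start_addr + iv.1 * size_bytes, iv.2))) with hL
  have hA : expected_burst_qwords_py initial_qwords start_addr beats size_bytes =
      (L.foldl (fun d p => d.insert p.1 (f p.2 (d.getD p.1 0))) (PySem.Dict.ofList initial_qwords)).items := by
    rw [hL, List.foldl_map]; rfl
  have hGfold : ((PySem.List.enumerate beats).foldl (fun g iv =>
        g.insert (PySem.Int.band (start_addr + iv.1 * size_bytes) (Int.not 0x7))
          (g.getD (PySem.Int.band (start_addr + iv.1 * size_bytes) (Int.not 0x7)) [] ++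
            [(start_addr + iv.1 * size_bytes, iv.2)])) PySem.Dict.empty) =
      (L.foldl (fun g p => g.modify p.1 [] (fun ws => ws ++ [p.2])) PySem.Dict.empty) := by
    rw [hL, List.foldl_map]; rfl
  set G := (L.foldl (fun g p => g.modify p.1 [] (fun ws => ws ++ [p.2])) PySem.Dict.empty) with hG
  have hkeys : G.keys = PySem.Set.ofList (L.map (·.1)) := by
    rw [hG, PySem.Dict.keys_foldl_modify_key L (·.1) [] (fun _ p ws => ws ++ [p.2]),
      PySem.Dict.keys_empty, PySem.Set.update_nil_left]
  have hget : ∀ a, G.getD a [] = (L.filter (fun p => p.1 == a)).map (·.2) := by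
    intro a
    rw [hG, PySem.Dict.getD_foldl_modify_append L PySem.Dict.empty a, PySem.Dict.getD_empty]
    rfl
  have hB : expected_burst_qwords_py_alt initial_qwords start_addr beats size_bytes =
      (G.keys.foldl (fun d a => d.insert a
          ((fun a v => (G.getD a []).foldl (fun qw w => f w qw) v) a (d.getD a 0)))
        (PySem.Dict.ofList initial_qwords)).items := by
    show ((((PySem.List.enumerate beats).foldl _ PySem.Dict.empty : PySem.Dict Int (List (Int × Int))).items.foldl _ _ : PySem.Dict Int Int)).items = _
    rw [hGfold,
      PySem.Dict.items_eq_map_keys G (by rw [hkeys]; exact PySem.Set.nodup_ofList _) [],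
      List.foldl_map]
    rfl
  rw [hA, hB]
  rw [pvA_char f L (PySem.Dict.ofList initial_qwords) (PySem.Dict.nodup_keys_ofList _)]
  rw [pvB_char (fun a v => (G.getD a []).foldl (fun qw w => f w qw) v) G.keys (PySem.Dict.ofList initial_qwords)
    (by rw [hkeys]; exact PySem.Set.nodup_ofList _) (PySem.Dict.nodup_keys_ofList _)]
  have happ : ∀ a v, (G.getD a []).foldl (fun qw w => f w qw) v = pvApp f L a v := by
    intro a v; rw [hget]; rfl
  congr 1
  · refine List.map_congr_left fun q _ => ?_
    by_cases hm : q.1 ∈ G.keys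
    · rw [if_pos hm, happ]
    · rw [if_neg hm]
      rw [pvApp_not_mem f L q.1 q.2 (by
        rw [hkeys] at hm
        exact fun h => hm ((PySem.Set.mem_ofList _ _).mpr h))]
  · rw [hkeys]
    refine List.map_congr_left fun a _ => ?_
    rw [happ]
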